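-- pv_equiv track=rewrite | github.com/obiSerra/code-challenges | advent2024/day-10/star.py | calculate_trail
-- ===== SOURCE A (Python) =====
-- def calculate_trail(input, point, ends):
--
--     x, y = point
--     if x < 0 or y < 0:
--         return []
--     try:
--         v = input[x][y]
--     except IndexError:
--         return []
--
--     if v == 9:
--         return [tuple(point)]
--
--     next_stp = [(x, y+1), (x+1, y), (x, y-1), (x-1, y)]
--
--     valid_steps = []
--     for step in next_stp:
--         try:
--             if input[step[0]][step[1]] == v+1:
--                 valid_steps.append(step)
--         except IndexError:
--             pass
--
--     end_list = []
--     for valid_step in valid_steps: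
--         end_list += calculate_trail(input, valid_step, ends)
--
--     return end_list
-- ===== SOURCE B (Python) =====
-- def calculate_trail(input, point, ends):
--     results = []
--     stack = [point]
--     while stack:
--         x, y = stack.pop()
--         if x < 0 or y < 0:
--             continue
--         try:
--             v = input[x][y]
--         except IndexError:
--             continue
--         if v == 9:
--             results.append((x, y))
--             continue
--         valid = []
--         for s in [(x, y + 1), (x + 1, y), (x, y - 1), (x - 1, y)]:
--             try:
--                 if input[s[0]][s[1]] == v + 1:
--                     valid.append(s)
--             except IndexError:
--                 pass
--         stack.extend(reversed(valid))
--     return results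
-- ===== Notes on version B (the rewrite author's own statement) =====
-- stated objective: alternative
-- what changed: Replaces A's recursive trail search (concatenating recursive results) by an iterative depth-first search with an explicit stack, pushing valid neighbours in reverse so endpoints are appended to a results accumulator in the same pre-order.
import Mathlib
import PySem

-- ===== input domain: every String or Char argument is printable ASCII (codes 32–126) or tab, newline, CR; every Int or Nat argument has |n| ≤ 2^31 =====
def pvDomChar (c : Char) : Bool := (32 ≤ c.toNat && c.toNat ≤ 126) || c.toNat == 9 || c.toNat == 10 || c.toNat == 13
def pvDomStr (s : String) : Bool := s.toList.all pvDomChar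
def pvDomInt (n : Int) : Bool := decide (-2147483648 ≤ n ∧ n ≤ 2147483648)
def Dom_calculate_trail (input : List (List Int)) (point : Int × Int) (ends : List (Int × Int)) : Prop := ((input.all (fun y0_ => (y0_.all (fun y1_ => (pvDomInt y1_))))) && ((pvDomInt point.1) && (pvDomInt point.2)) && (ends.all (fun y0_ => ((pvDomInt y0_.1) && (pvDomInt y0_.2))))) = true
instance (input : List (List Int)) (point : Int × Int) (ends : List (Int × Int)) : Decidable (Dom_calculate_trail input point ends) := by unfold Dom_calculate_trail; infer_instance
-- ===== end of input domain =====

-- B replaces A's recursion by an iterative DFS with an explicit stack (same visit order); objective: alternative decomposition, same cost.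


-- shared tiny helper: Python's input[x][y] (negative indices wrap, out of range = IndexError = none)
def pvGet2 (input : List (List Int)) (x y : Int) : Option Int :=
  (PySem.List.pyGet? input x).bind fun row => PySem.List.pyGet? row y

-- fuel bound used as a totality guard only: along a trail the cell value strictly
-- increases by 1 each step and every value on the path is attained by some cell,
-- so the recursion depth never exceeds the number of cells; the fuel never runs out.
def pvFuel (input : List (List Int)) : Nat :=
  input.foldl (fun a r => a + r.length) 0 + 2

-- ===== PORT A =====
-- literal transliteration of A's recursion; the Nat argument is pure fuel (see pvFuel)
def calAgo (input : List (List Int)) : Nat → Int × Int → List (Int × Int)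
  | 0, _ => []
  | Nat.succ fuel, (x, y) =>
    if x < 0 ∨ y < 0 then []
    else
      match pvGet2 input x y with
      | none => []
      | some v =>
        if v = 9 then [(x, y)]
        else
          let next_stp := [(x, y+1), (x+1, y), (x, y-1), (x-1, y)]
          let valid_steps := next_stp.filter (fun s => pvGet2 input s.1 s.2 == some (v+1))
          valid_steps.foldl (fun acc s => acc ++ calAgo input fuel s) []

def calculate_trail (input : List (List Int)) (point : Int × Int) (ends : List (Int × Int)) : List (Int × Int) :=
  calAgo input (pvFuel input) point

-- ===== PORT B =====
-- iterative DFS; the stack head is the top (Python pushes the reversed neighbour list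
-- at the end, so prepending the list here gives the identical pop order); each frame
-- carries its remaining fuel, again only as a totality guard.
def calBloop (input : List (List Int)) : List (Nat × Int × Int) → List (Int × Int) → List (Int × Int)
  | [], acc => acc
  | (0, _, _) :: rest, acc => calBloop input rest acc
  | (Nat.succ f, x, y) :: rest, acc =>
    if x < 0 ∨ y < 0 then calBloop input rest acc
    else
      match pvGet2 input x y with
      | none => calBloop input rest acc
      | some v =>
        if v = 9 then calBloop input rest (acc ++ [(x, y)])
        else
          let valid := [(x, y+1), (x+1, y), (x, y-1), (x-1, y)].filter
            (fun s => pvGet2 input s.1 s.2 == some (v+1))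
          calBloop input (valid.map (fun s => (f, s.1, s.2)) ++ rest) acc
  termination_by stack _ => (stack.map (fun t => 5 ^ t.1)).sum
  decreasing_by
  all_goals simp only [List.map_cons, List.sum_cons, List.map_append, List.sum_append, List.map_map]
  · omega
  · have hp : 0 < 5 ^ f := Nat.pow_pos (by norm_num); omega
  · have hp : 0 < 5 ^ f := Nat.pow_pos (by norm_num); omega
  · have hp : 0 < 5 ^ f := Nat.pow_pos (by norm_num); omega
  · have h4 : (List.filter (fun s => pvGet2 input s.1 s.2 == some (v+1))
        [(x, y+1), (x+1, y), (x, y-1), (x-1, y)]).length ≤ 4 := by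
      have := List.length_filter_le (fun s => pvGet2 input s.1 s.2 == some (v+1))
        [(x, y+1), (x+1, y), (x, y-1), (x-1, y)]
      simpa using this
    have hsum : (List.map ((fun t : Nat × Int × Int => 5 ^ t.1) ∘ fun s : Int × Int => (f, s.1, s.2))
        (List.filter (fun s => pvGet2 input s.1 s.2 == some (v+1))
          [(x, y+1), (x+1, y), (x, y-1), (x-1, y)])).sum
        = (List.filter (fun s => pvGet2 input s.1 s.2 == some (v+1))
            [(x, y+1), (x+1, y), (x, y-1), (x-1, y)]).length * 5 ^ f := by
      generalize (List.filter (fun s => pvGet2 input s.1 s.2 == some (v+1))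
          [(x, y+1), (x+1, y), (x, y-1), (x-1, y)]) = l
      induction l with
      | nil => simp
      | cons a t ih => simp [ih]; ring
    rw [hsum]
    have h1 : (List.filter (fun s => pvGet2 input s.1 s.2 == some (v+1))
        [(x, y+1), (x+1, y), (x, y-1), (x-1, y)]).length * 5 ^ f ≤ 4 * 5 ^ f :=
      Nat.mul_le_mul_right _ h4
    have h2 : 4 * 5 ^ f < 5 ^ (f + 1) := by
      have hp : 0 < 5 ^ f := Nat.pow_pos (by norm_num)
      omega
    exact Nat.add_lt_add_right (lt_of_le_of_lt h1 h2) _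

def calculate_trail_alt (input : List (List Int)) (point : Int × Int) (ends : List (Int × Int)) : List (Int × Int) :=
  calBloop input [(pvFuel input, point.1, point.2)] []

-- ===== PRECONDITION & SPEC =====
def Spec_calculate_trail (input : List (List Int)) (point : Int × Int) (ends : List (Int × Int)) (out : List (Int × Int)) : Prop := out = calculate_trail_alt input point ends
instance (input : List (List Int)) (point : Int × Int) (ends : List (Int × Int)) (out : List (Int × Int)) : Decidable (Spec_calculate_trail input point ends out) := by unfold Spec_calculate_trail; infer_instance

-- ===== CLAIM (what is proved, stated in full; the proofs are below) =====
def Claim_equal_calculate_trail : Prop := ∀ (input : List (List Int)) (point : Int × Int) (ends : List (Int × Int)), Dom_calculate_trail input point ends → Spec_calculate_trail input point ends (calculate_trail input point ends)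

-- ===== LEMMAS AND PROOFS =====

theorem calBloop_flat (input : List (List Int)) :
    ∀ stack acc, calBloop input stack acc
      = acc ++ (stack.map (fun t => calAgo input t.1 (t.2.1, t.2.2))).flatten := by
  intro stack acc
  induction stack, acc using calBloop.induct input
  all_goals simp_all [calBloop, calAgo]
  case case5 f x y rest acc h hv ih =>
    have hne : ¬ (x < 0 ∨ y < 0) := by omega
    simp only [if_neg hne]
    simp
  case case6 =>
    rename_i f x y rest acc v valid h hv hne9 ih
    have hne : ¬ (x < 0 ∨ y < 0) := by omega
    simp only [if_neg hne]
    simpa [Function.comp] using ih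

-- ===== VERDICT (by name: the statement is the Claim_ definition above) =====
theorem calculate_trail_spec : Claim_equal_calculate_trail := by
  intro input point ends _
  unfold Spec_calculate_trail calculate_trail calculate_trail_alt
  rw [calBloop_flat]
  simp
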